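-- pv_equiv track=rewrite | github.com/ThomasAntens-bradford/fms | fms/utils/general_utils.py | get_chunk_size
-- ===== SOURCE A (Python) =====
-- def get_chunk_size(n: int, max_chunk: int | None = None) -> int:
--     """
--     Return a divisor of n to use as chunk size.
--     If max_chunk is given, return the largest divisor <= max_chunk.
--     Otherwise, return roughly half of n (or closest smaller divisor).
--     """
--     divisors = [i for i in range(2, n) if n % i == 0]  # skip 1
--     if not divisors:
--         return n  # prime, use full width
--
--     if max_chunk:
--         divisors = [d for d in divisors if d <= max_chunk]
--         return divisors[-1] if divisors else n
--
--     # Default: pick roughly half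
--     half = n // 2
--     smaller_divisors = [d for d in divisors if d <= half]
--     return smaller_divisors[-1] if smaller_divisors else divisors[0]
-- ===== SOURCE B (Python) =====
-- def get_chunk_size(n: int, max_chunk: int | None = None) -> int:
--     # O(sqrt(n)): enumerate divisor pairs (i, n//i) for i up to sqrt(n)
--     # instead of scanning every candidate below n.
--     if n <= 3:
--         return n  # no proper divisor > 1 exists (covers negatives, 0..3)
--     bound = max_chunk if max_chunk else n // 2
--     best = 0       # largest proper divisor (>1) of n that is <= bound, 0 if none
--     smallest = 0   # smallest divisor of n in [2, n), 0 if n is prime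
--     i = 2
--     while i * i <= n:
--         if n % i == 0:
--             if smallest == 0:
--                 smallest = i
--             if i <= bound and best < i:
--                 best = i
--             j = n // i
--             if j < n and j <= bound and best < j:
--                 best = j
--         i += 1
--     if smallest == 0:
--         return n  # prime: use full width
--     if best != 0:
--         return best
--     # no divisor fits under the bound
--     return n if max_chunk else smallest
-- ===== Notes on version B (the rewrite author's own statement) =====
-- stated objective: faster
-- what changed: B enumerates divisor pairs (i, n//i) for i up to sqrt(n) in one loop keeping the best divisor under the bound and the smallest divisor, instead of A's full scan of every candidate in range(2, n) followed by list filters.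
import Mathlib
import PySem

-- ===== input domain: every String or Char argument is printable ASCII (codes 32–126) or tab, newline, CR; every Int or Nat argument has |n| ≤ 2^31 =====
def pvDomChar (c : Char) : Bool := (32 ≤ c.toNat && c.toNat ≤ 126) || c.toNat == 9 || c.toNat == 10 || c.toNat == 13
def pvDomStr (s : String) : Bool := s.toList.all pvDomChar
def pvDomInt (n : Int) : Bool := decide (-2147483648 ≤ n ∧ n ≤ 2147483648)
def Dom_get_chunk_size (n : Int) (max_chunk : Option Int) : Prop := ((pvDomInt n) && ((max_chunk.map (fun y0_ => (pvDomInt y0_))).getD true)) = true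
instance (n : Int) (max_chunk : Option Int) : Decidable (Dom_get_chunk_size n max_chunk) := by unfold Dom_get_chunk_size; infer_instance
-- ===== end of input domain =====

-- B replaces A's O(n) scan of all candidates below n by an O(√n) enumeration of
-- divisor pairs (i, n // i) for i up to √n, keeping the best divisor under the bound.

-- ===== PORT A =====
-- the list comprehension `[i for i in range(2, n) if n % i == 0]`
def pvDv (n : Int) : List Int :=
  (PySem.List.pyRange 2 n 1).filter (fun i => PySem.Int.mod n i == 0)

-- default branch of A ("pick roughly half"), shared by the `max_chunk` falsy paths
def pyChunkDefault (n : Int) (divisors : List Int) : Int :=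
  let half := PySem.Int.floordiv n 2
  let smaller := divisors.filter (fun d => decide (d ≤ half))
  match smaller.getLast? with
  | some d => d
  | none => divisors.headD n    -- divisors[0]; only reached with divisors ≠ []

def get_chunk_size (n : Int) (max_chunk : Option Int) : Int :=
  let divisors := pvDv n
  if divisors = [] then n
  else
    match max_chunk with
    | some m =>
      if m = 0 then pyChunkDefault n divisors   -- `if max_chunk:` — 0 is falsy
      else
        let ds := divisors.filter (fun d => decide (d ≤ m))
        match ds.getLast? with
        | some d => d
        | none => n
    | none => pyChunkDefault n divisors

-- ===== PORT B =====
-- the `while i * i <= n` loop of Source B; returns (best, smallest)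
def altLoop (n bound i best smallest : Int) : Int × Int :=
  if h : i * i ≤ n then
    if PySem.Int.mod n i == 0 then
      let smallest' := if smallest = 0 then i else smallest
      let best1 := if i ≤ bound ∧ best < i then i else best
      let j := PySem.Int.floordiv n i
      let best2 := if j < n ∧ j ≤ bound ∧ best1 < j then j else best1
      altLoop n bound (i + 1) best2 smallest'
    else altLoop n bound (i + 1) best smallest
  else (best, smallest)
termination_by (n + 1 - i).toNat
decreasing_by
  all_goals
    have hi : i ≤ n := by nlinarith [sq_nonneg (i - 1)]
    omega

def get_chunk_size_alt (n : Int) (max_chunk : Option Int) : Int :=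
  if n ≤ 3 then n
  else
    let bound := match max_chunk with
      | some m => if m = 0 then PySem.Int.floordiv n 2 else m
      | none => PySem.Int.floordiv n 2
    let r := altLoop n bound 2 0 0
    if r.2 = 0 then n
    else if r.1 ≠ 0 then r.1
    else match max_chunk with
      | some m => if m = 0 then r.2 else n
      | none => r.2

-- ===== PRECONDITION & SPEC =====
def Spec_get_chunk_size (n : Int) (max_chunk : Option Int) (out : Int) : Prop := out = get_chunk_size_alt n max_chunk
instance (n : Int) (max_chunk : Option Int) (out : Int) : Decidable (Spec_get_chunk_size n max_chunk out) := by unfold Spec_get_chunk_size; infer_instance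

-- ===== CLAIM (what is proved, stated in full; the proofs are below) =====
def Claim_equal_get_chunk_size : Prop := ∀ (n : Int) (max_chunk : Option Int), Dom_get_chunk_size n max_chunk → Spec_get_chunk_size n max_chunk (get_chunk_size n max_chunk)

-- ===== LEMMAS AND PROOFS =====

-- bounded-divisor predicate: divisors A's filtered lists retain under bound b
def pvPD (n b d : Int) : Prop := 2 ≤ d ∧ d < n ∧ d ∣ n ∧ d ≤ b

-- candidates seen by the loop before reaching index i
def pvCand (n b i d : Int) : Prop :=
  2 ≤ d ∧ d < n ∧ d ∣ n ∧ d ≤ b ∧ ∃ k, 2 ≤ k ∧ k < i ∧ k ∣ n ∧ (d = k ∨ d = n / k)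

def pvInvB (n b i best : Int) : Prop :=
  (best = 0 ∧ ∀ d, ¬ pvCand n b i d) ∨ (pvCand n b i best ∧ ∀ d, pvCand n b i d → d ≤ best)

def pvInvS (n i s : Int) : Prop :=
  (s = 0 ∧ ∀ k, 2 ≤ k → k < i → ¬ k ∣ n) ∨
  (2 ≤ s ∧ s < i ∧ s * s ≤ n ∧ s ∣ n ∧ ∀ k, 2 ≤ k → k < s → ¬ k ∣ n)

lemma pvMem_Dv (n d : Int) : d ∈ pvDv n ↔ 2 ≤ d ∧ d < n ∧ d ∣ n := by
  simp [pvDv, List.mem_filter, PySem.List.mem_pyRange_one, PySem.Int.mod_eq_zero_iff_dvd,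
    and_assoc]

lemma pvPairwise_Dv (n : Int) : (pvDv n).Pairwise (· < ·) := by
  exact (PySem.List.pairwise_lt_pyRange_one 2 n).filter _

lemma pvGetLast?_max {L : List Int} (h : L.Pairwise (· < ·)) {v : Int}
    (hv : L.getLast? = some v) : v ∈ L ∧ ∀ x ∈ L, x ≤ v := by
  induction L with
  | nil => simp at hv
  | cons a t ih =>
    match t, hv with
    | [], hv =>
      simp at hv
      subst hv; simp
    | b :: t', hv =>
      rw [List.getLast?_cons_cons] at hv
      obtain ⟨hm, hmax⟩ := ih (List.Pairwise.of_cons h) hv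
      refine ⟨List.mem_cons_of_mem _ hm, ?_⟩
      intro x hx
      rcases List.mem_cons.mp hx with rfl | hx
      · exact le_of_lt ((List.pairwise_cons.mp h).1 v hm)
      · exact hmax x hx

lemma pvHead_min {L : List Int} (h : L.Pairwise (· < ·)) (z : Int) :
    ∀ v ∈ L, L.headD z ≤ v := by
  intro v hv
  cases L with
  | nil => simp at hv
  | cons a t =>
    rcases List.mem_cons.mp hv with rfl | hv
    · simp
    · simpa using le_of_lt ((List.pairwise_cons.mp h).1 v hv)

-- cofactor facts: for 2 ≤ d < n, d ∣ n (n ≥ 4), the cofactor n/d is again a proper divisor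
lemma pvCofactor {n d : Int} (hn : 4 ≤ n) (h2 : 2 ≤ d) (hlt : d < n) (hdvd : d ∣ n) :
    2 ≤ n / d ∧ n / d < n ∧ n / d ∣ n ∧ d * (n / d) = n ∧ n / (n / d) = d := by
  obtain ⟨c, hc⟩ := hdvd
  have hd0 : d ≠ 0 := by omega
  have hq : n / d = c := by rw [hc, Int.mul_ediv_cancel_left _ hd0]
  have hc2 : 2 ≤ c := by nlinarith
  have hcn : c < n := by nlinarith
  have hc0 : c ≠ 0 := by omega
  refine ⟨by omega, by omega, ⟨d, by rw [hq, hc]; ring⟩, by rw [hq, ← hc], ?_⟩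
  rw [hq, hc, mul_comm, Int.mul_ediv_cancel_left _ hc0]

-- at loop exit every bounded divisor is a candidate (pairing argument)
lemma pvPD_cand {n b i d : Int} (hn : 4 ≤ n) (h2i : 2 ≤ i) (hi : ¬ i * i ≤ n)
    (hd : pvPD n b d) : pvCand n b i d := by
  obtain ⟨h2, hlt, hdvd, hb⟩ := hd
  refine ⟨h2, hlt, hdvd, hb, ?_⟩
  by_cases hsq : d * d ≤ n
  · -- d itself is below √n, so the loop reached it
    refine ⟨d, h2, ?_, hdvd, Or.inl rfl⟩
    by_contra hge
    push Not at hge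
    have : i * i ≤ d * d := by nlinarith
    omega
  · -- otherwise the cofactor n / d is below √n
    push Not at hsq
    obtain ⟨he2, hen, hedvd, hmul, hback⟩ := pvCofactor hn h2 hlt hdvd
    refine ⟨n / d, he2, ?_, hedvd, Or.inr hback.symm⟩
    have hlt' : n / d < d := by nlinarith
    have hsq' : (n / d) * (n / d) < n := by nlinarith
    by_contra hge
    push Not at hge
    have : i * i ≤ (n / d) * (n / d) := by nlinarith
    omega

-- exit-state conversions
lemma pvExitB {n b i best : Int} (hn : 4 ≤ n) (h2i : 2 ≤ i) (hi : ¬ i * i ≤ n)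
    (hB : pvInvB n b i best) :
    (best = 0 ∧ ∀ d, ¬ pvPD n b d) ∨ (pvPD n b best ∧ ∀ d, pvPD n b d → d ≤ best) := by
  rcases hB with ⟨h0, hno⟩ | ⟨hc, hmax⟩
  · exact Or.inl ⟨h0, fun d hd => hno d (pvPD_cand hn h2i hi hd)⟩
  · exact Or.inr ⟨⟨hc.1, hc.2.1, hc.2.2.1, hc.2.2.2.1⟩,
      fun d hd => hmax d (pvPD_cand hn h2i hi hd)⟩

lemma pvExitS {n i s : Int} (hn : 4 ≤ n) (h2i : 2 ≤ i) (hi : ¬ i * i ≤ n)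
    (hS : pvInvS n i s) :
    (s = 0 ∧ ∀ k, 2 ≤ k → k < n → ¬ k ∣ n) ∨
    (2 ≤ s ∧ s < n ∧ s ∣ n ∧ ∀ k, 2 ≤ k → k < s → ¬ k ∣ n) := by
  rcases hS with ⟨h0, hno⟩ | ⟨h2, hlt, hsq, hdvd, hmin⟩
  · refine Or.inl ⟨h0, ?_⟩
    intro k hk2 hkn hkdvd
    by_cases hsq : k * k ≤ n
    · have hki : k < i := by nlinarith
      exact hno k hk2 hki hkdvd
    · push Not at hsq
      obtain ⟨he2, hen, hedvd, hmul, _⟩ := pvCofactor hn hk2 hkn hkdvd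
      have hlt' : n / k < k := by nlinarith
      have hsq' : (n / k) * (n / k) < n := by nlinarith
      have hei : n / k < i := by nlinarith
      exact hno (n / k) he2 hei hedvd
  · exact Or.inr ⟨h2, by nlinarith, hdvd, hmin⟩

-- one-step candidate-set growth
lemma pvCand_succ {n b i : Int} (h2i : 2 ≤ i) (d : Int) :
    pvCand n b (i + 1) d ↔
      pvCand n b i d ∨ (i ∣ n ∧ 2 ≤ d ∧ d < n ∧ d ∣ n ∧ d ≤ b ∧ (d = i ∨ d = n / i)) := by
  constructor
  · rintro ⟨h2, hlt, hdvd, hb, k, hk2, hki, hkdvd, hdk⟩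
    by_cases hk : k < i
    · exact Or.inl ⟨h2, hlt, hdvd, hb, k, hk2, hk, hkdvd, hdk⟩
    · have : k = i := by omega
      subst this
      exact Or.inr ⟨hkdvd, h2, hlt, hdvd, hb, hdk⟩
  · rintro (⟨h2, hlt, hdvd, hb, k, hk2, hki, hkdvd, hdk⟩ | ⟨hidvd, h2, hlt, hdvd, hb, hdk⟩)
    · exact ⟨h2, hlt, hdvd, hb, k, hk2, by omega, hkdvd, hdk⟩
    · exact ⟨h2, hlt, hdvd, hb, i, h2i, by omega, hidvd, hdk⟩

-- generic "keep the max" update step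
lemma pvMaxStep {C C' : Int → Prop} {x best best' : Int} {cond : Prop}
    (hx : 2 ≤ x)
    (hC' : ∀ d, C' d ↔ C d ∨ (d = x ∧ cond))
    (hbest' : (cond ∧ best < x ∧ best' = x) ∨ (¬ (cond ∧ best < x) ∧ best' = best))
    (hinv : (best = 0 ∧ ∀ d, ¬ C d) ∨ (C best ∧ ∀ d, C d → d ≤ best)) :
    (best' = 0 ∧ ∀ d, ¬ C' d) ∨ (C' best' ∧ ∀ d, C' d → d ≤ best') := by
  rcases hbest' with ⟨hcond, hblt, rfl⟩ | ⟨hncond, rfl⟩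
  · refine Or.inr ⟨(hC' best').mpr (Or.inr ⟨rfl, hcond⟩), ?_⟩
    intro d hd
    rcases (hC' d).mp hd with hd | ⟨rfl, _⟩
    · rcases hinv with ⟨_, hno⟩ | ⟨_, hmax⟩
      · exact absurd hd (hno d)
      · exact le_trans (hmax d hd) (le_of_lt hblt)
    · exact le_refl _
  · rcases hinv with ⟨h0, hno⟩ | ⟨hc, hmax⟩
    · refine Or.inl ⟨h0, ?_⟩
      intro d hd
      rcases (hC' d).mp hd with hd | ⟨rfl, hcond⟩
      · exact hno d hd
      · exact hncond ⟨hcond, by omega⟩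
    · refine Or.inr ⟨(hC' _).mpr (Or.inl hc), ?_⟩
      intro d hd
      rcases (hC' d).mp hd with hd | ⟨rfl, hcond⟩
      · exact hmax d hd
      · by_contra hgt
        push Not at hgt
        exact hncond ⟨hcond, hgt⟩

-- invariant preservation for `smallest`
lemma pvInvS_step_div {n i s : Int} (h2i : 2 ≤ i) (hsq : i * i ≤ n) (hdvd : i ∣ n)
    (hS : pvInvS n i s) : pvInvS n (i + 1) (if s = 0 then i else s) := by
  rcases hS with ⟨h0, hno⟩ | ⟨h2, hlt, hssq, hsdvd, hmin⟩
  · rw [if_pos h0]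
    exact Or.inr ⟨h2i, by omega, hsq, hdvd, hno⟩
  · rw [if_neg (by omega)]
    exact Or.inr ⟨h2, by omega, hssq, hsdvd, hmin⟩

lemma pvInvS_step_nodiv {n i s : Int} (hdvd : ¬ i ∣ n)
    (hS : pvInvS n i s) : pvInvS n (i + 1) s := by
  rcases hS with ⟨h0, hno⟩ | ⟨h2, hlt, hssq, hsdvd, hmin⟩
  · refine Or.inl ⟨h0, ?_⟩
    intro k hk2 hki hk
    by_cases h : k < i
    · exact hno k hk2 h hk
    · have : k = i := by omega
      subst this; exact hdvd hk
  · exact Or.inr ⟨h2, by omega, hssq, hsdvd, hmin⟩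

lemma pvInvB_step_nodiv {n b i best : Int} (h2i : 2 ≤ i) (hdvd : ¬ i ∣ n)
    (hB : pvInvB n b i best) : pvInvB n b (i + 1) best := by
  have he : ∀ d, pvCand n b (i + 1) d ↔ pvCand n b i d := by
    intro d
    rw [pvCand_succ h2i]
    exact ⟨fun h => h.elim id (fun h => absurd h.1 hdvd), Or.inl⟩
  rcases hB with ⟨h0, hno⟩ | ⟨hc, hmax⟩
  · exact Or.inl ⟨h0, fun d hd => hno d ((he d).mp hd)⟩
  · exact Or.inr ⟨(he best).mpr hc, fun d hd => hmax d ((he d).mp hd)⟩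

-- the loop establishes: best = max bounded divisor (0 if none), smallest = least proper divisor (0 if none)
lemma pvAltLoop_spec (n b : Int) (hn : 4 ≤ n) :
    ∀ fuel i best s, (n + 1 - i).toNat ≤ fuel → 2 ≤ i →
    pvInvB n b i best → pvInvS n i s →
    (((altLoop n b i best s).1 = 0 ∧ ∀ d, ¬ pvPD n b d) ∨
      (pvPD n b (altLoop n b i best s).1 ∧ ∀ d, pvPD n b d → d ≤ (altLoop n b i best s).1)) ∧
    (((altLoop n b i best s).2 = 0 ∧ ∀ k, 2 ≤ k → k < n → ¬ k ∣ n) ∨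
      (2 ≤ (altLoop n b i best s).2 ∧ (altLoop n b i best s).2 < n ∧ (altLoop n b i best s).2 ∣ n ∧
        ∀ k, 2 ≤ k → k < (altLoop n b i best s).2 → ¬ k ∣ n)) := by
  intro fuel
  induction fuel with
  | zero =>
    intro i best s hfuel hi hB hS
    have hstop : ¬ i * i ≤ n := by
      intro h
      have : i ≤ n := by nlinarith [sq_nonneg (i - 1)]
      omega
    rw [altLoop, dif_neg hstop]
    exact ⟨pvExitB hn hi hstop hB, pvExitS hn hi hstop hS⟩
  | succ fuel ih =>
    intro i best s hfuel hi hB hS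
    by_cases hsq : i * i ≤ n
    · have hile : i ≤ n := by nlinarith [sq_nonneg (i - 1)]
      have hid : (0 : Int) < i := by omega
      have hiln : i < n := by nlinarith
      have hjdef : PySem.Int.floordiv n i = n / i := PySem.Int.floordiv_eq_ediv_of_pos hid
      by_cases hdvd : i ∣ n
      · have hmod : (PySem.Int.mod n i == 0) = true := by
          simp [PySem.Int.mod_eq_zero_iff_dvd, hdvd]
        obtain ⟨hj2, hjn, hjdvd, hjmul, hjback⟩ := pvCofactor hn hi hiln hdvd
        have hstep : altLoop n b i best s =
            altLoop n b (i + 1)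
              (if n / i < n ∧ n / i ≤ b ∧ (if i ≤ b ∧ best < i then i else best) < n / i
               then n / i else (if i ≤ b ∧ best < i then i else best))
              (if s = 0 then i else s) := by
          rw [altLoop, dif_pos hsq, if_pos hmod, hjdef]
        rw [hstep]
        have hC1 : ∀ d, pvCand n b (i + 1) d ↔
            (pvCand n b i d ∨ (d = i ∧ i ≤ b)) ∨ (d = n / i ∧ (n / i < n ∧ n / i ≤ b)) := by
          intro d
          rw [pvCand_succ hi]
          constructor
          · rintro (h | ⟨_, h2, hlt, hd, hb, rfl | rfl⟩)
            · exact Or.inl (Or.inl h)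
            · exact Or.inl (Or.inr ⟨rfl, hb⟩)
            · exact Or.inr ⟨rfl, hjn, hb⟩
          · rintro ((h | ⟨rfl, hb⟩) | ⟨rfl, _, hb⟩)
            · exact Or.inl h
            · exact Or.inr ⟨hdvd, hi, hiln, hdvd, hb, Or.inl rfl⟩
            · exact Or.inr ⟨hdvd, hj2, hjn, hjdvd, hb, Or.inr rfl⟩
        have h1 := pvMaxStep (C := pvCand n b i)
            (C' := fun d => pvCand n b i d ∨ (d = i ∧ i ≤ b))
            (x := i) (cond := i ≤ b)
            (best := best) (best' := if i ≤ b ∧ best < i then i else best)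
            hi (fun d => Iff.rfl) ?_ hB
        · have h2 := pvMaxStep (C := fun d => pvCand n b i d ∨ (d = i ∧ i ≤ b))
              (C' := pvCand n b (i + 1))
              (x := n / i) (cond := n / i < n ∧ n / i ≤ b)
              (best := if i ≤ b ∧ best < i then i else best)
              (best' := if n / i < n ∧ n / i ≤ b ∧ (if i ≤ b ∧ best < i then i else best) < n / i
                        then n / i else (if i ≤ b ∧ best < i then i else best))
              hj2 hC1 ?_ h1
          · exact ih (i + 1)
              (if n / i < n ∧ n / i ≤ b ∧ (if i ≤ b ∧ best < i then i else best) < n / i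
               then n / i else (if i ≤ b ∧ best < i then i else best))
              (if s = 0 then i else s)
              (by omega) (by omega) h2 (pvInvS_step_div hi hsq hdvd hS)
          · by_cases h : (n / i < n ∧ n / i ≤ b) ∧ (if i ≤ b ∧ best < i then i else best) < n / i
            · exact Or.inl ⟨h.1, h.2, if_pos (by tauto)⟩
            · exact Or.inr ⟨h, if_neg (by tauto)⟩
        · by_cases h : i ≤ b ∧ best < i
          · exact Or.inl ⟨h.1, h.2, if_pos h⟩
          · exact Or.inr ⟨h, if_neg h⟩
      · have hmod : ¬ ((PySem.Int.mod n i == 0) = true) := by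
          simp [PySem.Int.mod_eq_zero_iff_dvd, hdvd]
        have hstep : altLoop n b i best s = altLoop n b (i + 1) best s := by
          rw [altLoop, dif_pos hsq, if_neg hmod]
        rw [hstep]
        exact ih (i + 1) best s (by omega) (by omega)
          (pvInvB_step_nodiv hi hdvd hB) (pvInvS_step_nodiv hdvd hS)
    · rw [altLoop, dif_neg hsq]
      exact ⟨pvExitB hn hi hsq hB, pvExitS hn hi hsq hS⟩

-- what the loop result means for the lists A builds (for any bound b)
lemma pvBranch (n b : Int) (hn : 4 ≤ n) :
    (pvDv n = [] ↔ (altLoop n b 2 0 0).2 = 0) ∧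
    ((altLoop n b 2 0 0).1 ≠ 0 →
      ((pvDv n).filter (fun d => decide (d ≤ b))).getLast? = some (altLoop n b 2 0 0).1) ∧
    ((altLoop n b 2 0 0).1 = 0 →
      ((pvDv n).filter (fun d => decide (d ≤ b))).getLast? = none) ∧
    ((altLoop n b 2 0 0).1 = 0 → pvDv n ≠ [] → (pvDv n).headD n = (altLoop n b 2 0 0).2) := by
  obtain ⟨specB, specS⟩ := pvAltLoop_spec n b hn (n + 1 - 2).toNat 2 0 0 le_rfl le_rfl
    (Or.inl ⟨rfl, by rintro d ⟨_, _, _, _, k, hk2, hk, _⟩; omega⟩)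
    (Or.inl ⟨rfl, by intro k hk2 hk; omega⟩)
  have hmemF : ∀ d, d ∈ (pvDv n).filter (fun d => decide (d ≤ b)) ↔ pvPD n b d := by
    intro d
    constructor
    · intro h
      rcases List.mem_filter.mp h with ⟨hm, hble⟩
      rcases (pvMem_Dv n d).mp hm with ⟨a1, a2, a3⟩
      exact ⟨a1, a2, a3, by simpa using hble⟩
    · rintro ⟨a1, a2, a3, a4⟩
      exact List.mem_filter.mpr ⟨(pvMem_Dv n d).mpr ⟨a1, a2, a3⟩, by simpa⟩
  have hpairF : ((pvDv n).filter (fun d => decide (d ≤ b))).Pairwise (· < ·) :=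
    (pvPairwise_Dv n).filter _
  have ha : pvDv n = [] ↔ (altLoop n b 2 0 0).2 = 0 := by
    constructor
    · intro h
      rcases specS with ⟨h0, _⟩ | ⟨h2, hlt, hdvd, _⟩
      · exact h0
      · exact absurd ((pvMem_Dv n _).mpr ⟨h2, hlt, hdvd⟩) (by simp [h])
    · intro h0
      rcases specS with ⟨_, hno⟩ | ⟨h2, _⟩
      · rw [List.eq_nil_iff_forall_not_mem]
        intro d hd
        rcases (pvMem_Dv n d).mp hd with ⟨a1, a2, a3⟩
        exact hno d a1 a2 a3
      · omega
  refine ⟨ha, ?_, ?_, ?_⟩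
  · intro h1
    rcases specB with ⟨h0, _⟩ | ⟨hPD, hmax⟩
    · exact absurd h0 h1
    · cases hF : ((pvDv n).filter (fun d => decide (d ≤ b))).getLast? with
      | none =>
        have := List.getLast?_eq_none_iff.mp hF
        exact absurd ((hmemF _).mpr hPD) (by simp [this])
      | some v =>
        obtain ⟨hvmem, hvmax⟩ := pvGetLast?_max hpairF hF
        have h1v := hmax v ((hmemF v).mp hvmem)
        have h2v := hvmax _ ((hmemF _).mpr hPD)
        rw [show v = (altLoop n b 2 0 0).1 by omega]
  · intro h0
    rcases specB with ⟨_, hno⟩ | ⟨hPD, _⟩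
    · rw [List.getLast?_eq_none_iff, List.eq_nil_iff_forall_not_mem]
      intro d hd
      exact hno d ((hmemF d).mp hd)
    · rw [h0] at hPD
      rcases hPD with ⟨h2, _⟩
      omega
  · intro h0 hne
    rcases specS with ⟨h20, _⟩ | ⟨h2, hlt, hdvd, hmin⟩
    · exact absurd (ha.mpr h20) hne
    · cases hDv : pvDv n with
      | nil => exact absurd hDv hne
      | cons a t =>
        have hamem : a ∈ pvDv n := by rw [hDv]; exact List.mem_cons_self
        rcases (pvMem_Dv n a).mp hamem with ⟨b1, b2, b3⟩
        have hle : (pvDv n).headD n ≤ (altLoop n b 2 0 0).2 :=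
          pvHead_min (pvPairwise_Dv n) n _ ((pvMem_Dv n _).mpr ⟨h2, hlt, hdvd⟩)
        have hge : (altLoop n b 2 0 0).2 ≤ a := by
          by_contra hgt
          push Not at hgt
          exact hmin a b1 hgt b3
        simp only [List.headD_cons]
        rw [hDv] at hle
        simp only [List.headD_cons] at hle
        omega

-- ===== VERDICT (by name: the statement is the Claim_ definition above) =====
theorem get_chunk_size_spec : Claim_equal_get_chunk_size := by
  intro n mc _hdom
  unfold Spec_get_chunk_size
  by_cases hn : n ≤ 3
  · have hD : pvDv n = [] := by
      rw [List.eq_nil_iff_forall_not_mem]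
      intro d hd
      rcases (pvMem_Dv n d).mp hd with ⟨h2, hlt, hdvd⟩
      have hd2 : d = 2 := by omega
      subst hd2
      omega
    unfold get_chunk_size get_chunk_size_alt
    simp [hD, hn]
  · have hn4 : 4 ≤ n := by omega
    have hmain : ∀ bb : Int,
        (if pvDv n = [] then n
         else
           let ds := (pvDv n).filter (fun d => decide (d ≤ bb))
           match ds.getLast? with
           | some d => d
           | none => n) =
        (let r := altLoop n bb 2 0 0
         if r.2 = 0 then n else if r.1 ≠ 0 then r.1 else n) := by
      intro bb
      obtain ⟨ha, hb, hc, _⟩ := pvBranch n bb hn4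
      by_cases hD : pvDv n = []
      · rw [if_pos hD, if_pos (ha.mp hD)]
      · rw [if_neg hD, if_neg (fun h => hD (ha.mpr h))]
        by_cases h1 : (altLoop n bb 2 0 0).1 = 0
        · simp [hc h1, h1]
        · simp [hb h1, h1]
    have hdef :
        (if pvDv n = [] then n else pyChunkDefault n (pvDv n)) =
        (let r := altLoop n (PySem.Int.floordiv n 2) 2 0 0
         if r.2 = 0 then n else if r.1 ≠ 0 then r.1 else r.2) := by
      obtain ⟨ha, hb, hc, hd⟩ := pvBranch n (PySem.Int.floordiv n 2) hn4
      by_cases hD : pvDv n = []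
      · rw [if_pos hD, if_pos (ha.mp hD)]
      · rw [if_neg hD]
        unfold pyChunkDefault
        rw [if_neg (fun h => hD (ha.mpr h))]
        dsimp only
        by_cases h1 : (altLoop n (PySem.Int.floordiv n 2) 2 0 0).1 = 0
        · rw [hc h1]
          simp only [h1]
          simpa using hd h1 hD
        · rw [hb h1]
          show (altLoop n (PySem.Int.floordiv n 2) 2 0 0).1 =
            if (altLoop n (PySem.Int.floordiv n 2) 2 0 0).1 ≠ 0 then
              (altLoop n (PySem.Int.floordiv n 2) 2 0 0).1
            else (altLoop n (PySem.Int.floordiv n 2) 2 0 0).2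
          rw [if_pos h1]
    match mc with
    | none =>
      unfold get_chunk_size get_chunk_size_alt
      rw [if_neg (by omega : ¬ n ≤ 3)]
      exact hdef
    | some m =>
      by_cases hm : m = 0
      · subst hm
        unfold get_chunk_size get_chunk_size_alt
        rw [if_neg (by omega : ¬ n ≤ 3)]
        simpa using hdef
      · unfold get_chunk_size get_chunk_size_alt
        rw [if_neg (by omega : ¬ n ≤ 3)]
        simpa [hm] using hmain m
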